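-- pv_equiv track=rewrite | github.com/ColorfulPockets/the_gang | 7-card-hand-simulation.py | has_smaller_straight_flush_house
-- ===== SOURCE A (Python) =====
-- from collections import Counter, defaultdict
--
-- def has_smaller_straight_flush_house(hand, rank_counts):
--     pair_ranks = {rank for rank, count in rank_counts.items() if count >= 2}
--     if not pair_ranks:
--         return False
--
--     suit_groups = defaultdict(list)
--     for rank, suit in hand:
--         suit_groups[suit].append(rank)
--
--     for ranks in suit_groups.values():
--         unique = set(ranks)
--         if len(unique) < 3:
--             continue
--
--         if 1 in unique:
--             unique.add(14)
--
--         sorted_ranks = sorted(unique)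
--
--         for i in range(len(sorted_ranks) - 2):
--             first = sorted_ranks[i]
--             second = sorted_ranks[i + 1]
--             third = sorted_ranks[i + 2]
--
--             if second == first + 1 and third == second + 1:
--                 straight_flush_ranks = {1 if rank == 14 else rank for rank in (first, second, third)}
--                 if any(pair_rank not in straight_flush_ranks for pair_rank in pair_ranks):
--                     return True
--
--     return False
-- ===== SOURCE B (Python) =====
-- def has_smaller_straight_flush_house(hand, rank_counts):
--     pair_ranks = {rank for rank, count in rank_counts.items() if count >= 2}
--     if not pair_ranks:
--         return False
--
--     suit_sets = {}
--     for rank, suit in hand: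
--         suit_sets.setdefault(suit, set()).add(rank)
--
--     for ranks in suit_sets.values():
--         if len(ranks) < 3:
--             continue
--         if 1 in ranks:
--             ranks = ranks | {14}
--         for start in ranks:
--             if start + 1 in ranks and start + 2 in ranks:
--                 triple = {1 if r == 14 else r for r in (start, start + 1, start + 2)}
--                 if any(p not in triple for p in pair_ranks):
--                     return True
--     return False
-- ===== Notes on version B (the rewrite author's own statement) =====
-- stated objective: alternative
-- what changed: Per suit, ranks are collected directly into a set and straights are detected by membership probes (start, start+1, start+2 all in the set) instead of building a rank list, deduplicating, sorting it and scanning a sliding window over the sorted array.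
import Mathlib
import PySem

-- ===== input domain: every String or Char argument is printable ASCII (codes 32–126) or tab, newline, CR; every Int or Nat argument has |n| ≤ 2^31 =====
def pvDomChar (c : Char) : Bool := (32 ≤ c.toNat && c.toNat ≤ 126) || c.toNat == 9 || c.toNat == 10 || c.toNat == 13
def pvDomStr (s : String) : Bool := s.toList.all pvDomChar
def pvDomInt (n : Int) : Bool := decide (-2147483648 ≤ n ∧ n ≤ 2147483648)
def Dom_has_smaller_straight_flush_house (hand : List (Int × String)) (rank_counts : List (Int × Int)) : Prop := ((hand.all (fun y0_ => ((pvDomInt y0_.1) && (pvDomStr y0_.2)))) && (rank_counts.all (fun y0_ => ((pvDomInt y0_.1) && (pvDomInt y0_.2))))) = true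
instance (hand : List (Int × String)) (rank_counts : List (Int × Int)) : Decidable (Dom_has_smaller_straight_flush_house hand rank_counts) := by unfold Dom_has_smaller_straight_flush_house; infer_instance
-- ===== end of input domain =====

-- B replaces A's per-suit dedup + sort + sliding-window scan by a set built directly
-- from the hand and direct membership probes for start, start+1, start+2 (alternative algorithm).


-- ===== PORT A =====
-- shared helper: {rank for rank, count in rank_counts.items() if count >= 2}
-- (this comprehension appears verbatim in both Pythons)
def pvPairRanks (rank_counts : List (Int × Int)) : PySem.Set Int :=
  PySem.Set.ofList ((rank_counts.filter (fun rc => 2 ≤ rc.2)).map (fun rc => rc.1))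

-- shared helper: the straight-flush triple as a set, 14 mapped back to 1, then
-- any(pair_rank not in straight_flush_ranks for pair_rank in pair_ranks)
-- (both Pythons build this set and run this `any` with the same text)
def pvPairOutsideTriple (pair_ranks : PySem.Set Int) (a b c : Int) : Bool :=
  let straight_flush_ranks : PySem.Set Int :=
    PySem.Set.ofList ([a, b, c].map (fun r => if r = 14 then (1 : Int) else r))
  pair_ranks.any (fun p => !(PySem.Set.contains straight_flush_ranks p))

def has_smaller_straight_flush_house (hand : List (Int × String)) (rank_counts : List (Int × Int)) : Bool :=
  let pair_ranks := pvPairRanks rank_counts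
  if pair_ranks.isEmpty then false
  else
    -- suit_groups = defaultdict(list); for rank, suit in hand: suit_groups[suit].append(rank)
    let suit_groups : PySem.Dict String (List Int) :=
      hand.foldl (fun d p => d.modify p.2 [] (fun l => l ++ [p.1])) (PySem.Dict.mk [])
    suit_groups.values.any (fun ranks =>
      let unique : PySem.Set Int := PySem.Set.ofList ranks
      if PySem.Set.len unique < 3 then false
      else
        let unique := if PySem.Set.contains unique 1 then PySem.Set.add unique 14 else unique
        let sorted_ranks := PySem.List.sorted unique (fun x => x) false
        (List.range (sorted_ranks.length - 2)).any (fun i =>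
          let first := sorted_ranks.getD i 0
          let second := sorted_ranks.getD (i + 1) 0
          let third := sorted_ranks.getD (i + 2) 0
          if second = first + 1 ∧ third = second + 1 then
            pvPairOutsideTriple pair_ranks first second third
          else false))

-- ===== PORT B =====
def has_smaller_straight_flush_house_alt (hand : List (Int × String)) (rank_counts : List (Int × Int)) : Bool :=
  let pair_ranks := pvPairRanks rank_counts
  if pair_ranks.isEmpty then false
  else
    -- suit_sets = {}; for rank, suit in hand: suit_sets.setdefault(suit, set()).add(rank)
    let suit_sets : PySem.Dict String (PySem.Set Int) :=
      hand.foldl (fun d p => d.modify p.2 PySem.Set.empty (fun s => PySem.Set.add s p.1)) (PySem.Dict.mk [])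
    suit_sets.values.any (fun ranks0 =>
      if PySem.Set.len ranks0 < 3 then false
      else
        let ranks := if PySem.Set.contains ranks0 1 then PySem.Set.union ranks0 [14] else ranks0
        ranks.any (fun start =>
          PySem.Set.contains ranks (start + 1) && PySem.Set.contains ranks (start + 2) &&
            pvPairOutsideTriple pair_ranks start (start + 1) (start + 2)))

-- ===== PRECONDITION & SPEC =====
def Spec_has_smaller_straight_flush_house (hand : List (Int × String)) (rank_counts : List (Int × Int)) (out : Bool) : Prop := out = has_smaller_straight_flush_house_alt hand rank_counts
instance (hand : List (Int × String)) (rank_counts : List (Int × Int)) (out : Bool) : Decidable (Spec_has_smaller_straight_flush_house hand rank_counts out) := by unfold Spec_has_smaller_straight_flush_house; infer_instance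

-- ===== CLAIM (what is proved, stated in full; the proofs are below) =====
def Claim_equal_has_smaller_straight_flush_house : Prop := ∀ (hand : List (Int × String)) (rank_counts : List (Int × Int)), Dom_has_smaller_straight_flush_house hand rank_counts → Spec_has_smaller_straight_flush_house hand rank_counts (has_smaller_straight_flush_house hand rank_counts)

-- ===== LEMMAS AND PROOFS =====

-- value-wise image of a dict: same keys, values mapped by Set.ofList
def pvSetify (d : PySem.Dict String (List Int)) : PySem.Dict String (PySem.Set Int) :=
  PySem.Dict.mk (d.items.map (fun kv => (kv.1, PySem.Set.ofList kv.2)))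

lemma pvSetify_contains (d : PySem.Dict String (List Int)) (k : String) :
    (pvSetify d).contains k = d.contains k := by
  simp [pvSetify, PySem.Dict.contains, List.any_map, Function.comp_def]

lemma pvSetify_get? (d : PySem.Dict String (List Int)) (k : String) :
    (pvSetify d).get? k = (d.get? k).map PySem.Set.ofList := by
  simp [pvSetify, PySem.Dict.get?, List.find?_map, Function.comp_def]

lemma pvSetify_getD (d : PySem.Dict String (List Int)) (k : String) :
    (pvSetify d).getD k PySem.Set.empty = PySem.Set.ofList (d.getD k []) := by
  simp only [PySem.Dict.getD, pvSetify_get?]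
  cases d.get? k <;> rfl

lemma pvSetify_modify (d : PySem.Dict String (List Int)) (k : String) (r : Int) :
    (pvSetify d).modify k PySem.Set.empty (fun s => PySem.Set.add s r)
      = pvSetify (d.modify k [] (fun l => l ++ [r])) := by
  simp only [PySem.Dict.modify, pvSetify_getD, ← PySem.Set.ofList_append_singleton]
  simp only [PySem.Dict.insert, pvSetify_contains]
  by_cases h : d.contains k = true
  · simp only [h, if_pos]
    apply PySem.Dict.ext
    simp only [pvSetify, List.map_map]
    apply List.map_congr_left
    intro p _
    simp only [Function.comp_def]
    by_cases hp : (p.1 == k) = true <;> simp [hp]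
  · simp only [h, Bool.false_eq_true]
    apply PySem.Dict.ext
    simp [pvSetify]

lemma pvGroup_fold (hand : List (Int × String)) (d : PySem.Dict String (List Int)) :
    hand.foldl (fun d p => d.modify p.2 PySem.Set.empty (fun s => PySem.Set.add s p.1)) (pvSetify d)
      = pvSetify (hand.foldl (fun d p => d.modify p.2 [] (fun l => l ++ [p.1])) d) := by
  induction hand generalizing d with
  | nil => rfl
  | cons p t ih => simp only [List.foldl_cons, pvSetify_modify, ih]

lemma pvSetify_values (d : PySem.Dict String (List Int)) :
    (pvSetify d).values = d.values.map PySem.Set.ofList := by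
  simp [pvSetify, PySem.Dict.values, List.map_map, Function.comp]

-- in a strictly increasing list, a and a+1 sit at adjacent positions
lemma pvAdjacent (l : List Int) (hl : List.Pairwise (· < ·) l) (a : Int)
    {i j : Nat} (hi : i < l.length) (hj : j < l.length)
    (h1 : l[i] = a) (h2 : l[j] = a + 1) : j = i + 1 := by
  have hmono : ∀ p q (hp : p < l.length) (hq : q < l.length), p < q → l[p] < l[q] :=
    fun p q hp hq hpq => (List.pairwise_iff_getElem.mp hl) p q hp hq hpq
  have hij : i < j := by
    rcases lt_trichotomy i j with h | h | h
    · exact h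
    · exfalso; subst h; rw [h1] at h2; omega
    · exfalso; have := hmono j i hj hi h; rw [h1, h2] at this; omega
  by_cases hj1 : j = i + 1
  · exact hj1
  · exfalso
    have hi1 : i + 1 < l.length := by omega
    have h3 := hmono i (i+1) hi hi1 (by omega)
    have h4 := hmono (i+1) j hi1 hj (by omega)
    rw [h1] at h3; rw [h2] at h4; omega

-- core: sliding window over the sorted distinct ranks = membership probes on the set
lemma pvWindow_eq_member (e l : List Int) (hle : l = PySem.List.sorted e (fun x => x) false)
    (he : e.Nodup) (P : Int → Int → Int → Bool) :
    (List.range (l.length - 2)).any (fun i =>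
      if l.getD (i + 1) 0 = l.getD i 0 + 1 ∧ l.getD (i + 2) 0 = l.getD (i + 1) 0 + 1 then
        P (l.getD i 0) (l.getD (i + 1) 0) (l.getD (i + 2) 0)
      else false)
    = e.any (fun r =>
        PySem.Set.contains e (r + 1) && PySem.Set.contains e (r + 2) && P r (r + 1) (r + 2)) := by
  have hperm : l.Perm e := hle ▸ PySem.List.sorted_perm e (fun x => x) false
  have hnd : l.Nodup := hperm.nodup_iff.mpr he
  have hsorted : List.Pairwise (· ≤ ·) l := hle ▸ PySem.List.sorted_pairwise e (fun x => x)
  have hlt : List.Pairwise (· < ·) l :=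
    (hsorted.and hnd).imp (fun h => lt_of_le_of_ne h.1 h.2)
  rw [Bool.eq_iff_iff]
  simp only [List.any_eq_true, List.mem_range, Bool.and_eq_true, PySem.Set.contains_iff]
  constructor
  · rintro ⟨i, hi, h⟩
    have h0 : i < l.length := by omega
    have h1 : i + 1 < l.length := by omega
    have h2 : i + 2 < l.length := by omega
    rw [List.getD_eq_getElem l 0 h0, List.getD_eq_getElem l 0 h1,
        List.getD_eq_getElem l 0 h2] at h
    by_cases hc : l[i + 1] = l[i] + 1 ∧ l[i + 2] = l[i + 1] + 1
    · rw [if_pos hc] at h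
      refine ⟨l[i], hperm.subset (List.getElem_mem h0), ⟨?_, ?_⟩, ?_⟩
      · rw [← hc.1]; exact hperm.subset (List.getElem_mem h1)
      · have : l[i + 2] = l[i] + 2 := by omega
        rw [← this]; exact hperm.subset (List.getElem_mem h2)
      · rw [hc.2, hc.1] at h
        have h12 : l[i] + 1 + 1 = l[i] + 2 := by ring
        rw [h12] at h
        exact h
    · rw [if_neg hc] at h; exact absurd h (by simp)
  · rintro ⟨r, hr, ⟨hr1, hr2⟩, hP⟩
    obtain ⟨i, hi, hli⟩ := List.mem_iff_getElem.mp (hperm.mem_iff.mpr hr)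
    obtain ⟨j, hj, hlj⟩ := List.mem_iff_getElem.mp (hperm.mem_iff.mpr hr1)
    obtain ⟨k, hk, hlk⟩ := List.mem_iff_getElem.mp (hperm.mem_iff.mpr hr2)
    have hji : j = i + 1 := pvAdjacent l hlt r hi hj hli hlj
    have hkj : k = i + 2 := by
      have := pvAdjacent l hlt (r + 1) hj hk hlj (by rw [hlk]; ring)
      omega
    subst hji
    subst hkj
    have h0 : i < l.length - 2 := by omega
    refine ⟨i, h0, ?_⟩
    have hb0 : i < l.length := by omega
    have hb1 : i + 1 < l.length := by omega
    have hb2 : i + 2 < l.length := by omega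
    rw [List.getD_eq_getElem l 0 hb0, List.getD_eq_getElem l 0 hb1,
        List.getD_eq_getElem l 0 hb2, hli, hlj, hlk,
        if_pos (⟨rfl, by ring⟩ : r + 1 = r + 1 ∧ r + 2 = r + 1 + 1)]
    exact hP

-- per-suit check of A = per-suit check of B on the set of the same ranks
lemma pvSuit_eq (pair_ranks : PySem.Set Int) (ranks : List Int) :
    (let unique : PySem.Set Int := PySem.Set.ofList ranks
     if PySem.Set.len unique < 3 then false
     else
       let unique := if PySem.Set.contains unique 1 then PySem.Set.add unique 14 else unique
       let sorted_ranks := PySem.List.sorted unique (fun x => x) false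
       (List.range (sorted_ranks.length - 2)).any (fun i =>
         let first := sorted_ranks.getD i 0
         let second := sorted_ranks.getD (i + 1) 0
         let third := sorted_ranks.getD (i + 2) 0
         if second = first + 1 ∧ third = second + 1 then
           pvPairOutsideTriple pair_ranks first second third
         else false))
    = (let ranks0 : PySem.Set Int := PySem.Set.ofList ranks
       if PySem.Set.len ranks0 < 3 then false
       else
         let rs := if PySem.Set.contains ranks0 1 then PySem.Set.union ranks0 [14] else ranks0
         rs.any (fun start =>
           PySem.Set.contains rs (start + 1) && PySem.Set.contains rs (start + 2) &&
             pvPairOutsideTriple pair_ranks start (start + 1) (start + 2))) := by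
  show (if PySem.Set.len (PySem.Set.ofList ranks) < 3 then false else _)
      = (if PySem.Set.len (PySem.Set.ofList ranks) < 3 then false else _)
  by_cases hlen : PySem.Set.len (PySem.Set.ofList ranks) < 3
  · rw [if_pos hlen, if_pos hlen]
  · rw [if_neg hlen, if_neg hlen]
    have hu : (if PySem.Set.contains (PySem.Set.ofList ranks) 1 then
          PySem.Set.union (PySem.Set.ofList ranks) [14] else PySem.Set.ofList ranks)
        = (if PySem.Set.contains (PySem.Set.ofList ranks) 1 then
          PySem.Set.add (PySem.Set.ofList ranks) 14 else PySem.Set.ofList ranks) := by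
      by_cases h : PySem.Set.contains (PySem.Set.ofList ranks) 1 = true
      · rw [if_pos h, if_pos h]; rfl
      · rw [if_neg h, if_neg h]
    rw [hu]
    apply pvWindow_eq_member _ _ rfl
    by_cases h : PySem.Set.contains (PySem.Set.ofList ranks) 1 = true
    · simp only [h, if_true]
      exact PySem.Set.nodup_add _ _ (PySem.Set.nodup_ofList ranks)
    · simp only [h, Bool.false_eq_true, if_false]
      exact PySem.Set.nodup_ofList ranks

-- ===== VERDICT (by name: the statement is the Claim_ definition above) =====
theorem has_smaller_straight_flush_house_spec : Claim_equal_has_smaller_straight_flush_house := by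
  intro hand rank_counts _
  unfold Spec_has_smaller_straight_flush_house
  unfold has_smaller_straight_flush_house has_smaller_straight_flush_house_alt
  by_cases hp : (pvPairRanks rank_counts).isEmpty
  · simp [hp]
  · simp only [hp, Bool.false_eq_true, if_false]
    have hfold := pvGroup_fold hand (PySem.Dict.mk [])
    have : pvSetify (PySem.Dict.mk []) = PySem.Dict.mk [] := rfl
    rw [this] at hfold
    rw [hfold, pvSetify_values, List.any_map]
    apply PySem.List.any_congr_mem
    intro ranks _
    exact pvSuit_eq (pvPairRanks rank_counts) ranks
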